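-- pv_equiv track=rewrite | github.com/roclark/clarktech-ncaab-predictor | run-simulator.py | find_seeds
-- ===== SOURCE A (Python) =====
-- DIFFERENT_NUM_SEEDS = {11: 6, 16: 6}
--
-- REGULAR_NUM_SEEDS = 4
--
-- def slot_open(seed, filled_slots):
--     num_slots = REGULAR_NUM_SEEDS
--
--     if seed in DIFFERENT_NUM_SEEDS:
--         num_slots = DIFFERENT_NUM_SEEDS[seed]
--     if filled_slots < num_slots:
--         return True
--     return False
--
-- def find_seeds(ranked_field):
--     seeds = {}
--
--     seed = 1
--     for team in ranked_field:
--         if seed not in seeds: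
--             seeds[seed] = [team]
--             continue
--         if slot_open(seed, len(seeds[seed])):
--             seeds[seed].append(team)
--         else:
--             seed += 1
--             seeds[seed] = [team]
--     return seeds
-- ===== SOURCE B (Python) =====
-- DIFFERENT_NUM_SEEDS = {11: 6, 16: 6}
--
-- REGULAR_NUM_SEEDS = 4
--
--
-- def find_seeds(ranked_field):
--     rf = list(ranked_field)
--     seeds = {}
--     i = 0
--     seed = 1
--     while i < len(rf):
--         cap = DIFFERENT_NUM_SEEDS.get(seed, REGULAR_NUM_SEEDS)
--         seeds[seed] = rf[i:i + cap]
--         i += cap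
--         seed += 1
--     return seeds
-- ===== Notes on version B (the rewrite author's own statement) =====
-- stated objective: simpler
-- what changed: Replaces the per-team append/overflow state machine (dict-membership check, slot_open helper, mutable bucket appends) with a capacity-driven chunking loop that slices the next cap teams into each seed's bucket at once.
import Mathlib
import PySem

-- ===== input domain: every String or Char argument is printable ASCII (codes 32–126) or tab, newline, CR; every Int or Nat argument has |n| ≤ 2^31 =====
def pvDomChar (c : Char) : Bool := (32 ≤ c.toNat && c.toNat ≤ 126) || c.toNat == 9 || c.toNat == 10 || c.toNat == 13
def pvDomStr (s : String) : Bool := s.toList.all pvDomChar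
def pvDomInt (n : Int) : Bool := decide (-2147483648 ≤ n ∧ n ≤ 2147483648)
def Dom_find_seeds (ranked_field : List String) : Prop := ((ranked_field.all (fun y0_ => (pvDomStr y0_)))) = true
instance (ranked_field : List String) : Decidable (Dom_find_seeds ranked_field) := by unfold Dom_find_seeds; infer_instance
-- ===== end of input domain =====

-- B replaces A's per-team append/overflow state machine by a capacity-driven chunking loop (simpler decomposition, same O(n) cost).

-- ===== PORT A =====
def DIFFERENT_NUM_SEEDS : PySem.Dict Int Int := PySem.Dict.ofList [(11, 6), (16, 6)]

def REGULAR_NUM_SEEDS : Int := 4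

def slot_open (seed : Int) (filled_slots : Int) : Bool :=
  let num_slots := REGULAR_NUM_SEEDS
  let num_slots := if DIFFERENT_NUM_SEEDS.contains seed then DIFFERENT_NUM_SEEDS.getD seed num_slots else num_slots
  if filled_slots < num_slots then true else false

-- the body of A's for-loop (one team), as a foldl step over the state (seeds, seed)
def findStep (st : PySem.Dict Int (List String) × Int) (team : String) :
    PySem.Dict Int (List String) × Int :=
  let (seeds, seed) := st
  if ¬ seeds.contains seed then
    (seeds.insert seed [team], seed)
  else if slot_open seed ((seeds.getD seed []).length : Int) then
    (seeds.insert seed ((seeds.getD seed []) ++ [team]), seed)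
  else
    (seeds.insert (seed + 1) [team], seed + 1)

def find_seeds (ranked_field : List String) : List (Int × List String) :=
  (ranked_field.foldl findStep (PySem.Dict.empty, 1)).1.items

-- ===== PORT B =====
-- cap = DIFFERENT_NUM_SEEDS.get(seed, REGULAR_NUM_SEEDS)
def capOf (seed : Int) : Int := DIFFERENT_NUM_SEEDS.getD seed REGULAR_NUM_SEEDS

-- needed for altGo's termination: every capacity is positive
theorem capOf_eq (seed : Int) : capOf seed = if seed = 11 then 6 else if seed = 16 then 6 else 4 := by
  by_cases h11 : seed = 11
  · subst h11; decide
  by_cases h16 : seed = 16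
  · subst h16; decide
  · have hd : DIFFERENT_NUM_SEEDS = PySem.Dict.mk [(11, 6), (16, 6)] := rfl
    simp only [capOf, hd, PySem.Dict.getD_eq_get?_getD, PySem.Dict.get?_mk_cons]
    simp [Ne.symm h11, Ne.symm h16, h11, h16, PySem.Dict.get?, REGULAR_NUM_SEEDS]

theorem capOf_pos (seed : Int) : 0 < capOf seed := by
  rw [capOf_eq]; split_ifs <;> omega

-- B's while loop over the index i: seeds[seed] = rf[i:i+cap]; i += cap (slice exact for 0 ≤ i)
def altGo (rf : List String) (seeds : PySem.Dict Int (List String)) (i seed : Int) :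
    PySem.Dict Int (List String) :=
  if i < (rf.length : Int) then
    altGo rf (seeds.insert seed (PySem.List.slice rf (some i) (some (i + capOf seed))))
      (i + capOf seed) (seed + 1)
  else seeds
termination_by ((rf.length : Int) - i).toNat
decreasing_by
  have := capOf_pos seed
  omega

def find_seeds_alt (ranked_field : List String) : List (Int × List String) :=
  (altGo ranked_field PySem.Dict.empty 0 1).items

-- ===== PRECONDITION & SPEC =====
def Spec_find_seeds (ranked_field : List String) (out : List (Int × List String)) : Prop := out = find_seeds_alt ranked_field
instance (ranked_field : List String) (out : List (Int × List String)) : Decidable (Spec_find_seeds ranked_field out) := by unfold Spec_find_seeds; infer_instance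

-- ===== CLAIM (what is proved, stated in full; the proofs are below) =====
def Claim_equal_find_seeds : Prop := ∀ (ranked_field : List String), Dom_find_seeds ranked_field → Spec_find_seeds ranked_field (find_seeds ranked_field)

-- ===== LEMMAS AND PROOFS =====

theorem slot_open_eq (seed n : Int) : slot_open seed n = decide (n < capOf seed) := by
  unfold slot_open
  by_cases h : DIFFERENT_NUM_SEEDS.contains seed
  · simp [h, capOf]
  · simp [h, capOf,
      PySem.Dict.getD_of_not_contains DIFFERENT_NUM_SEEDS REGULAR_NUM_SEEDS (by simpa using h)]

theorem insert_insert_self (d : PySem.Dict Int (List String)) (k : Int) (v w : List String) :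
    (d.insert k v).insert k w = d.insert k w := by
  apply PySem.Dict.ext
  by_cases h : d.contains k
  · rw [PySem.Dict.items_insert_of_contains (d.insert k v) w (PySem.Dict.contains_insert_self _ _ _),
        PySem.Dict.items_insert_of_contains d v h,
        PySem.Dict.items_insert_of_contains d w h, List.map_map]
    refine List.map_congr_left fun p _ => ?_
    by_cases hp : p.1 = k <;> simp [hp]
  · have h' : d.contains k = false := by simpa using h
    have hne : ∀ p ∈ d.items, p.1 ≠ k := by
      intro p hp hk
      apply h
      apply (PySem.Dict.contains_iff_mem_keys _ _).mpr
      simp only [PySem.Dict.keys]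
      exact hk ▸ List.mem_map_of_mem (f := Prod.fst) hp
    have hmap : List.map (fun p => if (p.1 == k) = true then (k, w) else p) d.items = d.items := by
      rw [List.map_congr_left (g := id) (fun p hp => by simp [hne p hp]), List.map_id]
    rw [PySem.Dict.items_insert_of_contains (d.insert k v) w (PySem.Dict.contains_insert_self _ _ _),
        PySem.Dict.items_insert_of_not_contains d v h',
        PySem.Dict.items_insert_of_not_contains d w h', List.map_append, hmap]
    simp

theorem not_contains_of_keys_lt (d : PySem.Dict Int (List String)) (seed : Int)
    (h : ∀ k ∈ d.keys, k < seed) : d.contains seed = false := by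
  by_contra hc
  have := h seed ((PySem.Dict.contains_iff_mem_keys _ _).mp (by simpa using hc))
  omega

-- proof-side restatement of B's loop on the suffix rf.drop i (chunk off the next cap teams)
def chunkGo (seeds : PySem.Dict Int (List String)) (seed : Int) (rest : List String) :
    PySem.Dict Int (List String) :=
  if rest = [] then seeds
  else chunkGo (seeds.insert seed (rest.take (capOf seed).toNat)) (seed + 1)
             (rest.drop (capOf seed).toNat)
termination_by rest.length
decreasing_by
  rename_i h
  have hc : 1 ≤ (capOf seed).toNat := by have := capOf_pos seed; omega
  have : rest.length ≠ 0 := fun hl => h (List.eq_nil_of_length_eq_zero hl)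
  simp only [List.length_drop]; omega

-- B's index loop visits exactly the suffixes rf.drop i
theorem altGo_eq_chunkGo (rf : List String) (k : Nat) :
    ∀ (i : Nat) (seeds : PySem.Dict Int (List String)) (seed : Int),
    rf.length - i ≤ k →
    altGo rf seeds (i : Int) seed = chunkGo seeds seed (rf.drop i) := by
  induction k with
  | zero =>
    intro i seeds seed hk
    have hge : rf.length ≤ i := by omega
    rw [altGo, if_neg (by exact_mod_cast not_lt.mpr (by exact_mod_cast hge)),
        List.drop_eq_nil_of_le hge, chunkGo]
    simp
  | succ k ih =>
    intro i seeds seed hk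
    by_cases hi : i < rf.length
    · have hcap := capOf_pos seed
      have hslice : PySem.List.slice rf (some (i : Int)) (some ((i : Int) + capOf seed))
          = (rf.drop i).take (capOf seed).toNat := by
        rw [PySem.List.slice_toNat rf (by omega) (by omega)]
        congr 1
        omega
      have hnext : (i : Int) + capOf seed = ((i + (capOf seed).toNat : Nat) : Int) := by
        push_cast; omega
      rw [altGo, if_pos (by exact_mod_cast hi), hslice, hnext,
          ih (i + (capOf seed).toNat) _ (seed + 1) (by omega)]
      conv_rhs => rw [chunkGo]
      rw [if_neg (by
        intro hnil
        have := congrArg List.length hnil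
        simp only [List.length_drop, List.length_nil] at this
        omega)]
      rw [List.drop_drop]
    · have hge : rf.length ≤ i := by omega
      rw [altGo, if_neg (by exact_mod_cast not_lt.mpr (by exact_mod_cast hge)),
          List.drop_eq_nil_of_le hge, chunkGo]
      simp

theorem altGo_zero (rf : List String) (seeds : PySem.Dict Int (List String)) (seed : Int) :
    altGo rf seeds 0 seed = chunkGo seeds seed rf := by
  have h := altGo_eq_chunkGo rf rf.length 0 seeds seed (by omega)
  simpa using h

-- Main invariant: running A's fold with a fresh, not-yet-full current bucket equals B's chunker on part ++ rest.
theorem loop_eq (rest : List String) :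
    ∀ (done : PySem.Dict Int (List String)) (seed : Int) (part : List String),
    part ≠ [] → (part.length : Int) ≤ capOf seed →
    (∀ k ∈ done.keys, k < seed) → done.keys.Nodup →
    (rest.foldl findStep (done.insert seed part, seed)).1
      = chunkGo done seed (part ++ rest) := by
  induction rest with
  | nil =>
    intro done seed part hne hle _ _
    have htake : part.take (capOf seed).toNat = part :=
      List.take_of_length_le (by omega)
    have hdrop : part.drop (capOf seed).toNat = [] :=
      List.drop_eq_nil_of_le (by omega)
    simp only [List.foldl_nil, List.append_nil]
    rw [chunkGo]
    simp [hne, htake, hdrop, chunkGo]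
  | cons team rest ih =>
    intro done seed part hne hle hlt hnd
    have hcontains : (done.insert seed part).contains seed = true :=
      PySem.Dict.contains_insert_self _ _ _
    have hgetD : (done.insert seed part).getD seed [] = part :=
      PySem.Dict.getD_insert_self _ _ _ _
    simp only [List.foldl_cons]
    rw [show findStep (done.insert seed part, seed) team =
        if ((part.length : Int) < capOf seed) then
          ((done.insert seed part).insert seed (part ++ [team]), seed)
        else ((done.insert seed part).insert (seed + 1) [team], seed + 1) by
      simp [findStep, hcontains, hgetD, slot_open_eq]]
    by_cases hfits : (part.length : Int) < capOf seed
    · rw [if_pos hfits, insert_insert_self]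
      have := ih done seed (part ++ [team]) (by simp)
        (by simp; omega) hlt hnd
      rw [this]; simp
    · rw [if_neg hfits]
      have heq : part.length = (capOf seed).toNat := by
        have := capOf_pos seed; omega
      have hfresh : done.contains seed = false := not_contains_of_keys_lt _ _ hlt
      have hkeys : (done.insert seed part).keys = done.keys ++ [seed] :=
        PySem.Dict.keys_insert_of_not_contains _ _ hfresh
      have := ih (done.insert seed part) (seed + 1) [team] (by simp)
        (by have := capOf_pos (seed + 1); simp; omega)
        (by intro k hk; rw [hkeys] at hk; rcases List.mem_append.mp hk with h | h
            · exact lt_trans (hlt k h) (by omega)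
            · simp at h; omega)
        (by rw [hkeys]; exact List.nodup_append.mpr ⟨hnd, List.nodup_singleton _,
              by intro x hx; simp; intro hxs; exact absurd (hxs ▸ hlt x hx) (lt_irrefl _)⟩)
      rw [this]
      conv_rhs => rw [chunkGo]
      have htake : (part ++ team :: rest).take (capOf seed).toNat = part := by
        rw [← heq]; exact List.take_left
      have hdrop : (part ++ team :: rest).drop (capOf seed).toNat = team :: rest := by
        rw [← heq]; exact List.drop_left
      simp [htake, hdrop]

-- ===== VERDICT (by name: the statement is the Claim_ definition above) =====
theorem find_seeds_spec : Claim_equal_find_seeds := by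
  intro rf _
  unfold Spec_find_seeds find_seeds find_seeds_alt
  cases rf with
  | nil =>
    rw [show (([] : List String)).foldl findStep (PySem.Dict.empty, 1) = (PySem.Dict.empty, 1) from rfl,
        altGo, if_neg (by simp)]
  | cons t ts =>
    simp only [List.foldl_cons]
    rw [show findStep (PySem.Dict.empty, 1) t = (PySem.Dict.empty.insert 1 [t], 1) by
      simp [findStep, PySem.Dict.contains_empty]]
    rw [loop_eq ts PySem.Dict.empty 1 [t] (by simp)
      (by rw [capOf_eq]; norm_num)
      (by simp [PySem.Dict.keys_empty])
      (by simp [PySem.Dict.keys_empty]),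
      List.singleton_append, ← altGo_zero]
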